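-- pv_equiv track=rewrite | github.com/wmww/wifi-sync | sync_wifi.py | get_new
-- ===== SOURCE A (Python) =====
-- def get_new(old_list, new_list):
--     old_dict = {}
--     for i in old_list:
--         old_dict[i['ssid']] = True
--     ret = []
--     for i in new_list:
--         if i['ssid'] not in old_dict:
--             ret.append(i)
--     return ret
-- ===== SOURCE B (Python) =====
-- def get_new(old_list, new_list):
--     # Successive elimination: start from all new entries and, for each known
--     # network in old_list, delete every candidate sharing its ssid.
--     ret = list(new_list)
--     for o in old_list:
--         s = o['ssid']
--         ret = [n for n in ret if n['ssid'] != s]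
--     return ret
-- ===== Notes on version B (the rewrite author's own statement) =====
-- stated objective: alternative
-- what changed: B inverts the traversal: instead of A's seen-ssid dict plus one accumulator pass over new_list, B loops over old_list and successively filters the shrinking candidate list (starting from all of new_list), deleting entries that share each old ssid.
import Mathlib
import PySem

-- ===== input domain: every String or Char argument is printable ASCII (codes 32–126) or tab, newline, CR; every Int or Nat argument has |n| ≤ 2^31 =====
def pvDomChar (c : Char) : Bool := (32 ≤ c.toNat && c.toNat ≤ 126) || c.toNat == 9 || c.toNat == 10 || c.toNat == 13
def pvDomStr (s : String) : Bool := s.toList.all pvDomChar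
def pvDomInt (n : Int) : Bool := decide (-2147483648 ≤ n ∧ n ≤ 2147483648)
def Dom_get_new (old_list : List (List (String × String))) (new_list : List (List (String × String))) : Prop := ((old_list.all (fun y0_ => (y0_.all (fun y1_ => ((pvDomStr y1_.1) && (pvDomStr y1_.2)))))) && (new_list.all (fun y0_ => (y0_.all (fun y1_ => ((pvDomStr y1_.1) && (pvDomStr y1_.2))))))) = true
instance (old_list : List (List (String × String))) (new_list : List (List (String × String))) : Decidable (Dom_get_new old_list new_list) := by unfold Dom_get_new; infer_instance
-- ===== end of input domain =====

-- B inverts the traversal: it loops over old_list, successively filtering the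
-- candidate list (initially new_list) by each old ssid; same return value on Pre_.


-- i['ssid'] : first-match lookup (Python dict access); getD "" only fires outside Pre_
def pvSsid (i : List (String × String)) : String :=
  ((PySem.Dict.mk i).get? "ssid").getD ""

-- ===== PORT A =====
def get_new (old_list : List (List (String × String))) (new_list : List (List (String × String))) : List (List (String × String)) :=
  let old_dict : PySem.Dict String Bool :=
    old_list.foldl (fun d i => d.insert (pvSsid i) true) PySem.Dict.empty
  new_list.foldl (fun ret i => if !(old_dict.contains (pvSsid i)) then ret ++ [i] else ret) []

-- ===== PORT B =====
def get_new_alt (old_list : List (List (String × String))) (new_list : List (List (String × String))) : List (List (String × String)) :=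
  old_list.foldl (fun ret o => ret.filter (fun n => !(pvSsid n == pvSsid o))) new_list

-- ===== PRECONDITION & SPEC =====
-- Pre_ excludes exactly the inputs where some entry lacks an 'ssid' key, on which the Python A raises KeyError.
def Pre_get_new (old_list : List (List (String × String))) (new_list : List (List (String × String))) : Prop :=
  (old_list.all (fun i => ((PySem.Dict.mk i).get? "ssid").isSome)
    && new_list.all (fun i => ((PySem.Dict.mk i).get? "ssid").isSome)) = true
instance (old_list : List (List (String × String))) (new_list : List (List (String × String))) : Decidable (Pre_get_new old_list new_list) := by unfold Pre_get_new; infer_instance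
def pvWitness_get_new : (List (List (String × String))) × (List (List (String × String))) :=
  ([[("ssid", "home")]], [[("ssid", "home")], [("ssid", "cafe"), ("psk", "x")]])

def Spec_get_new (old_list : List (List (String × String))) (new_list : List (List (String × String))) (out : List (List (String × String))) : Prop := out = get_new_alt old_list new_list
instance (old_list : List (List (String × String))) (new_list : List (List (String × String))) (out : List (List (String × String))) : Decidable (Spec_get_new old_list new_list out) := by unfold Spec_get_new; infer_instance

-- ===== CLAIM (what is proved, stated in full; the proofs are below) =====
def Claim_equal_get_new : Prop := ∀ (old_list : List (List (String × String))) (new_list : List (List (String × String))), Dom_get_new old_list new_list → Pre_get_new old_list new_list → Spec_get_new old_list new_list (get_new old_list new_list)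

-- ===== LEMMAS AND PROOFS =====

-- the seen-ssid dict built by A's first loop contains s iff some old entry has ssid s
lemma contains_foldl_insert_ssid (l : List (List (String × String))) (d : PySem.Dict String Bool) (s : String) :
    (l.foldl (fun d i => d.insert (pvSsid i) true) d).contains s
      = (d.contains s || l.any (fun i => pvSsid i == s)) := by
  induction l generalizing d with
  | nil => rw [List.foldl_nil, List.any_nil, Bool.or_false]
  | cons x xs ih =>
      simp only [List.foldl_cons, List.any_cons, ih, PySem.Dict.contains_insert]
      have hc : (pvSsid x == s) = (s == pvSsid x) := by
        by_cases h : pvSsid x = s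
        · simp [h]
        · simp [h, Ne.symm h]
      rw [Bool.or_assoc, hc, Bool.or_left_comm]

-- B's successive-elimination loop equals one filter by "no old entry shares the ssid"
lemma foldl_filter_eq_filter_all (l : List (List (String × String))) (xs : List (List (String × String))) :
    l.foldl (fun ret o => ret.filter (fun n => !(pvSsid n == pvSsid o))) xs
      = xs.filter (fun n => l.all (fun o => !(pvSsid n == pvSsid o))) := by
  induction l generalizing xs with
  | nil => simp
  | cons x t ih =>
      rw [List.foldl_cons, ih, List.filter_filter]
      apply List.filter_congr
      intro n _
      simp [Bool.and_comm]

-- ===== VERDICT (by name: the statement is the Claim_ definition above) =====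
theorem get_new_spec : Claim_equal_get_new := by
  intro old_list new_list _ _
  show _ = _
  simp only [get_new, get_new_alt]
  rw [PySem.List.foldl_append_if, foldl_filter_eq_filter_all]
  simp only [List.nil_append, List.map_id']
  apply List.filter_congr
  intro n _
  rw [contains_foldl_insert_ssid]
  simp [Bool.beq_comm, List.any_eq_not_all_not]
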